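-- pv_equiv track=rewrite | github.com/majakolar/rhythmic-gymnastics_automatic-analysis | src/rg_ai/utils/label_consolidation.py | _extract_sublabel_from_filename
-- ===== SOURCE A (Python) =====
-- from typing import Dict, List, Set, Tuple
--
-- def _extract_sublabel_from_filename(filename: str, main_label: str, sublabels: List[str]) -> str:
--     """Extract sublabel from filename with improved matching."""
--     # result = get_label_from_filename(
--     #     filename=filename,
--     #     main_label_index=0,
--     #     use_sublabels=True,
--     #     joined_label_dict={main_label: sublabels},
--     #     fallback_general=True
--     # )
--     # return result
--
--     # sublabels by length (longest first) to avoid partial matches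
--     sorted_sublabels = sorted(sublabels, key=len, reverse=True)
--
--     for sublabel in sorted_sublabels:
--         if sublabel == "GENERAL":
--             continue
--         if f"{main_label}_{sublabel}_person" in filename:
--             return sublabel
--
--     return "GENERAL"
-- ===== SOURCE B (Python) =====
-- def _extract_sublabel_from_filename(filename: str, main_label: str, sublabels):
--     """Extract sublabel from filename: longest matching sublabel, else GENERAL."""
--     candidates = [s for s in sublabels
--                   if s != "GENERAL" and f"{main_label}_{s}_person" in filename]
--     if candidates:
--         return max(candidates, key=len)
--     return "GENERAL"
-- ===== Notes on version B (the rewrite author's own statement) =====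
-- stated objective: simpler
-- what changed: Replaces sort-by-length-descending plus an early-return scan loop with a single filter of matching sublabels followed by a linear max-by-length selection (no sort); Python's first-maximum rule of max reproduces the stable-sort tie-breaking exactly.
import Mathlib
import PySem

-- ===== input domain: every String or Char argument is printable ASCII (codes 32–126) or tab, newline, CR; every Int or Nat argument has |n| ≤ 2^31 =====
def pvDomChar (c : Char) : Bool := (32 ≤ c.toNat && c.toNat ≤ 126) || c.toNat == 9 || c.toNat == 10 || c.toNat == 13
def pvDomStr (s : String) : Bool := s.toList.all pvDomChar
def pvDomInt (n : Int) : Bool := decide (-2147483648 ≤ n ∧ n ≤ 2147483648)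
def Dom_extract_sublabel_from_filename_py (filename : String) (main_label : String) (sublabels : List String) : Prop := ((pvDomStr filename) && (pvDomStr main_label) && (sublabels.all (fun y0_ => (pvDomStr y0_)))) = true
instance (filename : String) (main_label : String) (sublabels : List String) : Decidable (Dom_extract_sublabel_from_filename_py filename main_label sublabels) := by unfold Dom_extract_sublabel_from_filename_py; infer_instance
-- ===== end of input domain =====

-- ===== PORT A =====
-- B replaces A's sort + early-return loop by filter + linear max; objective: simpler.
-- helper: A's for-loop with continue / early return over the sorted list
def pvLoopA (filename : String) (main_label : String) : List String → String
  | [] => "GENERAL"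
  | s :: rest =>
    if s == "GENERAL" then pvLoopA filename main_label rest
    else if PySem.Str.isIn (main_label ++ "_" ++ s ++ "_person") filename then s
    else pvLoopA filename main_label rest

def extract_sublabel_from_filename_py (filename : String) (main_label : String) (sublabels : List String) : String :=
  pvLoopA filename main_label (PySem.List.sorted sublabels (fun s => PySem.Str.len s) true)

-- ===== PORT B =====
def extract_sublabel_from_filename_py_alt (filename : String) (main_label : String) (sublabels : List String) : String :=
  let candidates := sublabels.filter
    (fun s => s != "GENERAL" && PySem.Str.isIn (main_label ++ "_" ++ s ++ "_person") filename)
  match PySem.List.max? candidates (fun s => PySem.Str.len s) with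
  | some m => m
  | none => "GENERAL"

-- ===== PRECONDITION & SPEC =====
def Spec_extract_sublabel_from_filename_py (filename : String) (main_label : String) (sublabels : List String) (out : String) : Prop := out = extract_sublabel_from_filename_py_alt filename main_label sublabels
instance (filename : String) (main_label : String) (sublabels : List String) (out : String) : Decidable (Spec_extract_sublabel_from_filename_py filename main_label sublabels out) := by unfold Spec_extract_sublabel_from_filename_py; infer_instance

-- ===== CLAIM (what is proved, stated in full; the proofs are below) =====
def Claim_equal_extract_sublabel_from_filename_py : Prop := ∀ (filename : String) (main_label : String) (sublabels : List String), Dom_extract_sublabel_from_filename_py filename main_label sublabels → Spec_extract_sublabel_from_filename_py filename main_label sublabels (extract_sublabel_from_filename_py filename main_label sublabels)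

-- ===== LEMMAS AND PROOFS =====

-- A's loop returns the first element that passes the combined test, else "GENERAL".
theorem pvLoopA_eq_head_filter (filename main_label : String) (l : List String) :
    pvLoopA filename main_label l =
      match (l.filter (fun s => s != "GENERAL" &&
          PySem.Str.isIn (main_label ++ "_" ++ s ++ "_person") filename)).head? with
      | some m => m
      | none => "GENERAL" := by
  induction l with
  | nil => rfl
  | cons s rest ih =>
    by_cases hg : s == "GENERAL"
    · simp [pvLoopA, hg, List.filter_cons, ih, bne]
    · by_cases hin : PySem.Str.isIn (main_label ++ "_" ++ s ++ "_person") filename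
      · simp at hin
        simp [pvLoopA, hg, hin, List.filter_cons, bne]
      · simp at hin
        simp [pvLoopA, hg, hin, List.filter_cons, ih, bne]

-- inserting a filtered-out element does not change the filtered list
theorem filter_insertBy_neg {α : Type} (before : α → α → Bool) (P : α → Bool) (x : α)
    (l : List α) (hx : P x = false) :
    (PySem.List.insertBy before x l).filter P = l.filter P := by
  induction l with
  | nil => simp [PySem.List.insertBy, hx]
  | cons y ys ih =>
    by_cases hb : before x y
    · simp [PySem.List.insertBy, hb, List.filter_cons, hx]
    · simp only [PySem.List.insertBy, hb, if_neg, Bool.false_eq_true, not_false_iff,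
        List.filter_cons]
      by_cases hy : P y <;> simp [hy, ih]

-- first P-element after inserting x (P x = true) into a key-descending list:
-- x wins exactly when its key is strictly larger than the current first P-element's key
theorem head_filter_insertBy {α κ : Type} [LinearOrder κ] (key : α → κ) (P : α → Bool)
    (x : α) (l : List α) (hs : l.Pairwise (fun a b => key b ≤ key a)) (hx : P x = true) :
    ((PySem.List.insertBy (fun a b => decide (key b < key a)) x l).filter P).head? =
      match (l.filter P).head? with
      | none => some x
      | some m => if key m < key x then some x else some m := by
  induction l with
  | nil => simp [PySem.List.insertBy, hx]
  | cons y ys ih =>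
    rcases List.pairwise_cons.mp hs with ⟨hy_ge, hys⟩
    by_cases hb : key y < key x
    · -- x is inserted in front
      have : PySem.List.insertBy (fun a b => decide (key b < key a)) x (y :: ys)
          = x :: y :: ys := by simp [PySem.List.insertBy, hb]
      rw [this]
      rcases h : ((y :: ys).filter P).head? with _ | ⟨m⟩
      · simp [List.filter_cons, hx, h]
      · have hm : m ∈ (y :: ys).filter P := List.mem_of_mem_head? h
        have hm' : m ∈ y :: ys := List.mem_of_mem_filter hm
        have hmy : key m ≤ key y := by
          rcases List.mem_cons.mp hm' with rfl | hmem
          · exact le_refl _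
          · exact hy_ge m hmem
        have : key m < key x := lt_of_le_of_lt hmy hb
        simp [List.filter_cons, hx, h, this]
    · -- x goes after y
      have hins : PySem.List.insertBy (fun a b => decide (key b < key a)) x (y :: ys)
          = y :: PySem.List.insertBy (fun a b => decide (key b < key a)) x ys := by
        simp [PySem.List.insertBy, hb]
      rw [hins]
      by_cases hy : P y
      · have hxy : ¬ key y < key x := hb
        simp [List.filter_cons, hy, hxy]
      · simp [List.filter_cons, hy, ih hys]

-- Python max over a list with one more element at the end
theorem max?_append_one {α κ : Type} [LinearOrder κ] (key : α → κ) (l : List α) (x : α) :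
    PySem.List.max? (l ++ [x]) key =
      match PySem.List.max? l key with
      | none => some x
      | some m => if key m < key x then some x else some m := by
  simp only [PySem.List.max?, List.foldl_append, List.foldl_cons, List.foldl_nil]
  cases h : List.foldl
      (fun acc x => match acc with
        | none => some x
        | some m => if key m < key x then some x else some m) none l <;> rfl

-- the core equivalence: first P-hit of the stable length-descending sort
-- equals Python max over the filtered original list
theorem head_filter_sorted_eq_max {α κ : Type} [LinearOrder κ] (key : α → κ) (P : α → Bool)
    (xs : List α) :
    ((PySem.List.sorted xs key true).filter P).head? = PySem.List.max? (xs.filter P) key := by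
  induction xs using List.reverseRecOn with
  | nil => rfl
  | append_singleton xs x ih =>
    have hstep : PySem.List.sorted (xs ++ [x]) key true =
        PySem.List.insertBy (fun a b => decide (key b < key a)) x
          (PySem.List.sorted xs key true) := by
      rw [PySem.List.sorted_rev_eq_foldl_insertBy, PySem.List.sorted_rev_eq_foldl_insertBy,
        List.foldl_append, List.foldl_cons, List.foldl_nil]
    rw [hstep, List.filter_append]
    by_cases hx : P x
    · rw [head_filter_insertBy key P x _ (PySem.List.sorted_pairwise_rev xs key) hx]
      rw [ih]
      simp [List.filter_cons, hx, max?_append_one]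
    · rw [filter_insertBy_neg _ P x _ (by simp [hx])]
      simp [List.filter_cons, hx, ih]

-- ===== VERDICT (by name: the statement is the Claim_ definition above) =====
theorem extract_sublabel_from_filename_py_spec : Claim_equal_extract_sublabel_from_filename_py := by
  intro filename main_label sublabels _hdom
  unfold Spec_extract_sublabel_from_filename_py
  unfold extract_sublabel_from_filename_py extract_sublabel_from_filename_py_alt
  rw [pvLoopA_eq_head_filter,
    head_filter_sorted_eq_max (fun s => PySem.Str.len s)
      (fun s => s != "GENERAL" && PySem.Str.isIn (main_label ++ "_" ++ s ++ "_person") filename)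
      sublabels]
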